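-- pv_equiv track=rewrite | github.com/WerthPADOH/japanese | numbers.py | int_to_kanji
-- ===== SOURCE A (Python) =====
-- number_kanji = {
--     0: 'ゼロ',
--     1: '一',
--     2: '二',
--     3: '三',
--     4: '四',
--     5: '五',
--     6: '六',
--     7: '七',
--     8: '八',
--     9: '九',
--     10: '十',
--     100: '百',
--     1000: '千',
--     10**4: '万',
--     10**8: '億',
--     10**12: '兆'
--     }
--
-- def int_to_kanji(i: int):
--     """
--     >>> int_to_kanji(1)
--     '一'
--     >>> int_to_kanji(36)
--     '三十六'
--     >>> int_to_kanji(999)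
--     '九百九十九'
--     >>> int_to_kanji(8002)
--     '八千二'
--     >>> int_to_kanji(1234567890)
--     '十二億三千四百五十六万七千八百九十'
--     >>> int_to_kanji(10**8)
--     '一億'
--     >>> int_to_kanji(-569)
--     'マイナス五百六十九'
--     >>> int_to_kanji(-0)
--     'ゼロ'
--     """
--     out = ''
--     if i < 0:
--         out = 'マイナス'
--         i = -i
--     if i in {0, 1, 2, 3, 4, 5, 6, 7, 8, 9, 10, 100, 1000}:
--         return out + number_kanji[i]
--     remainder = i
--     threshholds = [10**12, 10**8, 10**4, 1000, 100, 10]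
--     for n in threshholds:
--         factor, remainder = divmod(remainder, n)
--         if factor:
--             if factor == 1 and n in {10, 100, 1000}:
--                 out += number_kanji[n]
--             else:
--                 out += int_to_kanji(factor) + number_kanji[n]
--         if not remainder:
--             break
--     if remainder:
--         out += number_kanji[remainder]
--     return out
-- ===== SOURCE B (Python) =====
-- DIGITS = {1: '一', 2: '二', 3: '三', 4: '四', 5: '五',
--           6: '六', 7: '七', 8: '八', 9: '九'}
-- UNITS = ['', '万', '億', '兆']
--
--
-- def _group_to_kanji(g):
--     """Kanji for 1 <= g <= 9999, suppressing a leading 一 before 千/百/十."""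
--     s = ''
--     for place, kanji in ((1000, '千'), (100, '百'), (10, '十')):
--         d, g = divmod(g, place)
--         if d:
--             s += (DIGITS[d] if d > 1 else '') + kanji
--     if g:
--         s += DIGITS[g]
--     return s
--
--
-- def int_to_kanji(i: int):
--     if i == 0:
--         return 'ゼロ'
--     sign = 'マイナス' if i < 0 else ''
--     n = abs(i)
--     groups = []
--     while n:
--         groups.append(n % 10000)
--         n //= 10000
--     parts = []
--     for g, unit in zip(reversed(groups), reversed(UNITS[:len(groups)])):
--         if g:
--             parts.append(_group_to_kanji(g) + unit)
--     return sign + ''.join(parts)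
-- ===== Notes on version B (the rewrite author's own statement) =====
-- stated objective: idiomatic
-- what changed: Replaces A's recursive divmod cascade over six thresholds with breaks (and a special-cased small-number set) by the idiomatic decomposition: split |i| into four-digit myriad groups with a while loop, render each non-zero group with a flat non-recursive place loop, and join the groups with their units.
import Mathlib
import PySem

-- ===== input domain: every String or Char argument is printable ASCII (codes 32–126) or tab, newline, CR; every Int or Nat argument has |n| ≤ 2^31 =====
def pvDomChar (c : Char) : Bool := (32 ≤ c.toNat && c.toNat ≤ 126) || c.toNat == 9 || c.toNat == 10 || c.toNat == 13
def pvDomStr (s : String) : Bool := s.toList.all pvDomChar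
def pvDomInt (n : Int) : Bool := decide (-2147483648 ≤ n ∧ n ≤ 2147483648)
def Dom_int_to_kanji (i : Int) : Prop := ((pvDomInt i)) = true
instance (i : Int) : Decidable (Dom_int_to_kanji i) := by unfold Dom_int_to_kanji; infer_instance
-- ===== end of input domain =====

-- B re-groups |i| into four-digit myriad chunks rendered by a dedicated non-recursive
-- group renderer instead of A's recursive divmod cascade over six thresholds with breaks
-- (objective: idiomatic/alternative decomposition, same asymptotic cost).

-- termination helpers for the ports' well-founded recursions (cited by the
-- decreasing_by proofs below; kept tiny on purpose)
lemma pvDivLt (a b k : Nat) (hk : 1 < k) (h : ¬ a / k = 0) (hle : a ≤ b) :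
    2 * (a / k) + 1 < 2 * b + 1 := by
  have ha : a ≠ 0 := fun h0 => h (by rw [h0, Nat.zero_div])
  have := Nat.div_lt_self (Nat.pos_of_ne_zero ha) hk
  omega

lemma pvDivLt' (a b k : Nat) (hk : 1 < k) (h : ¬ a / k = 0) (hle : a ≤ b) :
    2 * (a / k) + 1 < 2 * b := by
  have ha : a ≠ 0 := fun h0 => h (by rw [h0, Nat.zero_div])
  have := Nat.div_lt_self (Nat.pos_of_ne_zero ha) hk
  omega

lemma pvModLt (a b : Nat) (hle : a ≤ b) : 2 * a < 2 * b + 1 := by omega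

lemma pvDivSelfLt (n k : Nat) (hk : 1 < k) (h : ¬ n = 0) : n / k < n :=
  Nat.div_lt_self (Nat.pos_of_ne_zero h) hk

-- ===== PORT A =====
-- the number_kanji dict (only the keys A actually reads)
def numberKanji (n : Nat) : String :=
  if n = 0 then "ゼロ" else if n = 1 then "一" else if n = 2 then "二"
  else if n = 3 then "三" else if n = 4 then "四" else if n = 5 then "五"
  else if n = 6 then "六" else if n = 7 then "七" else if n = 8 then "八"
  else if n = 9 then "九" else if n = 10 then "十" else if n = 100 then "百"
  else if n = 1000 then "千" else ""

-- A's body after the sign handling (all of A's recursive calls have a nonnegative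
-- argument, so the recursion lives on Nat).  The fixed six-threshold loop with its
-- `break` is unrolled literally: `low` is the tail of the loop for the thresholds
-- 1000/100/10 plus the final `if remainder:` append.
mutual
def kanjiCore (n : Nat) : String :=
  -- `if i in {0,1,...,10,100,1000}: return out + number_kanji[i]`
  if n = 0 ∨ n = 1 ∨ n = 2 ∨ n = 3 ∨ n = 4 ∨ n = 5 ∨ n = 6 ∨ n = 7 ∨ n = 8 ∨
     n = 9 ∨ n = 10 ∨ n = 100 ∨ n = 1000 then numberKanji n
  else
    -- threshold 10**12
    let f12 := n / 1000000000000
    let r12 := n % 1000000000000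
    let out1 := if h12 : f12 = 0 then "" else kanjiCore f12 ++ "兆"
    if r12 = 0 then out1 else
    -- threshold 10**8
    let f8 := r12 / 100000000
    let r8 := r12 % 100000000
    let out2 := out1 ++ (if h8 : f8 = 0 then "" else kanjiCore f8 ++ "億")
    if r8 = 0 then out2 else
    -- threshold 10**4
    let f4 := r8 / 10000
    let r4 := r8 % 10000
    let out3 := out2 ++ (if h4 : f4 = 0 then "" else kanjiCore f4 ++ "万")
    if r4 = 0 then out3 else low r4 out3
termination_by (2 * n + 1)
decreasing_by
  · exact pvDivLt n n _ (by decide) h12 (Nat.le_refl n)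
  · exact pvDivLt _ n _ (by decide) h8 (Nat.mod_le n _)
  · exact pvDivLt _ n _ (by decide) h4 ((Nat.mod_le _ _).trans (Nat.mod_le n _))
  · exact pvModLt _ n (((Nat.mod_le _ _).trans (Nat.mod_le _ _)).trans (Nat.mod_le n _))

def low (r : Nat) (out : String) : String :=
  -- threshold 1000 (factor == 1 prints only the unit)
  let f3 := r / 1000
  let r3 := r % 1000
  let out1 := out ++ (if h3 : f3 = 0 then "" else if f3 = 1 then "千" else kanjiCore f3 ++ "千")
  if r3 = 0 then out1 else
  -- threshold 100
  let f2 := r3 / 100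
  let r2 := r3 % 100
  let out2 := out1 ++ (if h2 : f2 = 0 then "" else if f2 = 1 then "百" else kanjiCore f2 ++ "百")
  if r2 = 0 then out2 else
  -- threshold 10
  let f1 := r2 / 10
  let r1 := r2 % 10
  let out3 := out2 ++ (if h1 : f1 = 0 then "" else if f1 = 1 then "十" else kanjiCore f1 ++ "十")
  -- `if remainder: out += number_kanji[remainder]`
  out3 ++ (if r1 = 0 then "" else numberKanji r1)
termination_by (2 * r)
decreasing_by
  · exact pvDivLt' r r _ (by decide) h3 (Nat.le_refl r)
  · exact pvDivLt' _ r _ (by decide) h2 (Nat.mod_le r _)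
  · exact pvDivLt' _ r _ (by decide) h1 ((Nat.mod_le _ _).trans (Nat.mod_le r _))
end

def int_to_kanji (i : Int) : String :=
  if i < 0 then "マイナス" ++ kanjiCore (-i).toNat else kanjiCore i.toNat

-- ===== PORT B =====
def pyDigit (d : Nat) : String :=
  if d = 1 then "一" else if d = 2 then "二" else if d = 3 then "三"
  else if d = 4 then "四" else if d = 5 then "五" else if d = 6 then "六"
  else if d = 7 then "七" else if d = 8 then "八" else if d = 9 then "九" else ""

-- body of _group_to_kanji's for-loop
def groupStep (st : String × Nat) (pk : Nat × String) : String × Nat :=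
  let d := st.2 / pk.1
  let g := st.2 % pk.1
  (st.1 ++ (if d ≠ 0 then (if d > 1 then pyDigit d else "") ++ pk.2 else ""), g)

def groupToKanji (g : Nat) : String :=
  let sg := [(1000, "千"), (100, "百"), (10, "十")].foldl groupStep ("", g)
  sg.1 ++ (if sg.2 ≠ 0 then pyDigit sg.2 else "")

-- the `while n:` chunking loop (least-significant group first)
def toGroups (n : Nat) : List Nat :=
  if n = 0 then [] else n % 10000 :: toGroups (n / 10000)
decreasing_by exact pvDivSelfLt n _ (by decide) (by assumption)

def int_to_kanji_alt (i : Int) : String :=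
  if i = 0 then "ゼロ" else
  let sign := if i < 0 then "マイナス" else ""
  let gs := toGroups i.natAbs
  let units : List String := ["", "万", "億", "兆"]
  let parts := (gs.reverse.zip ((units.take gs.length).reverse)).filterMap
    (fun gu => if gu.1 ≠ 0 then some (groupToKanji gu.1 ++ gu.2) else none)
  sign ++ String.join parts

-- ===== PRECONDITION & SPEC =====
def Spec_int_to_kanji (i : Int) (out : String) : Prop := out = int_to_kanji_alt i
instance (i : Int) (out : String) : Decidable (Spec_int_to_kanji i out) := by unfold Spec_int_to_kanji; infer_instance

-- ===== CLAIM (what is proved, stated in full; the proofs are below) =====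
def Claim_equal_int_to_kanji : Prop := ∀ (i : Int), Dom_int_to_kanji i → Spec_int_to_kanji i (int_to_kanji i)

-- ===== LEMMAS AND PROOFS =====

-- single digits: A's recursion bottoms out at the kanji B's digit table holds
lemma kanjiCore_digit (d : Nat) (h1 : 1 ≤ d) (h9 : d ≤ 9) : kanjiCore d = pyDigit d := by
  interval_cases d <;> (unfold kanjiCore; decide)

-- the trailing ones digit: A's dict lookup agrees with B's digit table
lemma fin_eq (d : Nat) (h : d ≤ 9) :
    (if d = 0 then "" else numberKanji d) = (if d ≠ 0 then pyDigit d else "") := by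
  interval_cases d <;> decide

-- one inner place (千/百/十): A's factor==1 suppression equals B's rendering
lemma place_eq (f : Nat) (hf : f ≤ 9) (u : String) :
    (if f = 0 then "" else if f = 1 then u else kanjiCore f ++ u)
      = (if f ≠ 0 then (if f > 1 then pyDigit f else "") ++ u else "") := by
  rcases Nat.lt_or_ge f 2 with h | h
  · interval_cases f <;> simp
  · rw [kanjiCore_digit f (by omega) hf, if_neg (by omega), if_neg (by omega),
        if_pos (by omega : f ≠ 0), if_pos (by omega : f > 1)]

-- the unrolled tail of A's loop renders exactly B's four-digit group
lemma low_eq (r : Nat) (out : String) (h1 : 1 ≤ r) (h : r ≤ 9999) :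
    low r out = out ++ groupToKanji r := by
  unfold low
  simp only [groupToKanji, groupStep, List.foldl, dite_eq_ite]
  rw [← place_eq (r / 1000) (by omega), ← place_eq (r % 1000 / 100) (by omega),
      ← place_eq (r % 1000 % 100 / 10) (by omega), ← fin_eq (r % 1000 % 100 % 10) (by omega)]
  by_cases h3 : r % 1000 = 0
  · simp [h3]
  · by_cases h2 : r % 1000 % 100 = 0
    · simp [h3, h2, String.append_assoc]
    · simp [h3, String.append_assoc]
      intro hc; exfalso; omega

-- A agrees with B's group renderer on one myriad group
lemma kanjiCore_group (m : Nat) (h1 : 1 ≤ m) (h : m ≤ 9999) :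
    kanjiCore m = groupToKanji m := by
  by_cases hs : m = 1 ∨ m = 2 ∨ m = 3 ∨ m = 4 ∨ m = 5 ∨ m = 6 ∨ m = 7 ∨ m = 8 ∨
      m = 9 ∨ m = 10 ∨ m = 100 ∨ m = 1000
  · rcases hs with rfl|rfl|rfl|rfl|rfl|rfl|rfl|rfl|rfl|rfl|rfl|rfl <;> (unfold kanjiCore; decide)
  · unfold kanjiCore
    have e12 : m / 1000000000000 = 0 := by omega
    have r12 : m % 1000000000000 = m := by omega
    have e8 : m / 100000000 = 0 := by omega
    have r8 : m % 100000000 = m := by omega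
    have e4 : m / 10000 = 0 := by omega
    have r4 : m % 10000 = m := by omega
    have hm0 : ¬ m = 0 := by omega
    have hl : ∀ out, low m out = out ++ groupToKanji m := fun out => low_eq m out h1 h
    rw [if_neg (by omega)]
    simp [e12, r12, e8, r8, e4, r4, hm0, hl]

-- unfolding the chunking loop once
lemma toGroups_eq (n : Nat) :
    toGroups n = if n = 0 then [] else n % 10000 :: toGroups (n / 10000) := by
  rw [toGroups]

-- the main body lemma: A's cascade equals B's grouped join for 1 ≤ n ≤ 2^31
lemma core_eq (n : Nat) (h1 : 1 ≤ n) (h : n ≤ 2147483648) :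
    kanjiCore n =
      String.join (((toGroups n).reverse.zip
          (((["", "万", "億", "兆"] : List String).take (toGroups n).length).reverse)).filterMap
        (fun gu => if gu.1 ≠ 0 then some (groupToKanji gu.1 ++ gu.2) else none)) := by
  have hn0 : ¬ n = 0 := by omega
  by_cases hA : n ≤ 9999
  · -- one group
    have tg : toGroups n = [n] := by
      rw [toGroups_eq, if_neg hn0, (by omega : n % 10000 = n), (by omega : n / 10000 = 0),
          toGroups_eq, if_pos rfl]
    rw [kanjiCore_group n h1 hA]
    simp [tg, hn0, String.join]
  · by_cases hB : n ≤ 99999999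
    · -- two groups
      have tg : toGroups n = [n % 10000, n / 10000] := by
      -- 
        rw [toGroups_eq, if_neg hn0, toGroups_eq, if_neg (by omega : ¬ n / 10000 = 0),
            (by omega : n / 10000 % 10000 = n / 10000), Nat.div_div_eq_div_mul,
            (by omega : n / (10000 * 10000) = 0), toGroups_eq, if_pos rfl]
      have hk4 : kanjiCore (n / 10000) = groupToKanji (n / 10000) :=
        kanjiCore_group _ (by omega) (by omega)
      unfold kanjiCore
      rw [if_neg (by omega)]
      have e12 : n / 1000000000000 = 0 := by omega
      have r12e : n % 1000000000000 = n := by omega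
      have e8 : n / 100000000 = 0 := by omega
      have r8e : n % 100000000 = n := by omega
      have hf4 : ¬ n / 10000 = 0 := by omega
      by_cases hr4 : n % 10000 = 0
      · simp [e12, r12e, e8, r8e, hf4, hk4, hr4, tg, hn0, String.join]
      · have hl : ∀ o, low (n % 10000) o = o ++ groupToKanji (n % 10000) :=
          fun o => low_eq _ o (by omega) (by omega)
        simp [e12, r12e, e8, r8e, hf4, hk4, hr4, hl, tg, hn0, String.join, String.append_assoc]
    · -- three groups
      have tg : toGroups n = [n % 10000, n / 10000 % 10000, n / 100000000] := by
        rw [toGroups_eq, if_neg hn0, toGroups_eq, if_neg (by omega : ¬ n / 10000 = 0),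
            toGroups_eq, Nat.div_div_eq_div_mul, (by norm_num : (10000 : Nat) * 10000 = 100000000),
            if_neg (by omega : ¬ n / 100000000 = 0),
            (by omega : n / 100000000 % 10000 = n / 100000000), Nat.div_div_eq_div_mul,
            (by omega : n / (100000000 * 10000) = 0), toGroups_eq, if_pos rfl]
      have hk8 : kanjiCore (n / 100000000) = groupToKanji (n / 100000000) :=
        kanjiCore_group _ (by omega) (by omega)
      unfold kanjiCore
      rw [if_neg (by omega)]
      have e12 : n / 1000000000000 = 0 := by omega
      have r12e : n % 1000000000000 = n := by omega
      have hf8 : ¬ n / 100000000 = 0 := by omega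
      have ef4 : n % 100000000 / 10000 = n / 10000 % 10000 := by omega
      have er4 : n % 100000000 % 10000 = n % 10000 := by omega
      by_cases hr8 : n % 100000000 = 0
      · have z4 : n / 10000 % 10000 = 0 := by omega
        have z0 : n % 10000 = 0 := by omega
        simp [e12, r12e, hf8, hk8, hr8, z4, z0, tg, hn0, String.join]
      · by_cases hf4 : n / 10000 % 10000 = 0
        · by_cases hr4 : n % 10000 = 0
          · exfalso; omega
          · have hl : ∀ o, low (n % 10000) o = o ++ groupToKanji (n % 10000) :=
              fun o => low_eq _ o (by omega) (by omega)
            simp [e12, r12e, hf8, hk8, hr8, ef4, er4, hf4, hr4, hl, tg, hn0, String.join,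
              String.append_assoc]
        · have hk4 : kanjiCore (n / 10000 % 10000) = groupToKanji (n / 10000 % 10000) :=
            kanjiCore_group _ (by omega) (by omega)
          by_cases hr4 : n % 10000 = 0
          · simp [e12, r12e, hf8, hk8, hr8, ef4, er4, hf4, hk4, hr4, tg, hn0, String.join,
              String.append_assoc]
          · have hl : ∀ o, low (n % 10000) o = o ++ groupToKanji (n % 10000) :=
              fun o => low_eq _ o (by omega) (by omega)
            simp [e12, r12e, hf8, hk8, hr8, ef4, er4, hf4, hk4, hr4, hl, tg, hn0, String.join,
              String.append_assoc]

-- ===== VERDICT (by name: the statement is the Claim_ definition above) =====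
theorem int_to_kanji_spec : Claim_equal_int_to_kanji := by
  intro i hdom
  have hdom' : -2147483648 ≤ i ∧ i ≤ 2147483648 := by
    unfold Dom_int_to_kanji pvDomInt at hdom; simpa using hdom
  unfold Spec_int_to_kanji int_to_kanji int_to_kanji_alt
  dsimp only
  by_cases h0 : i = 0
  · subst h0
    norm_num
    unfold kanjiCore
    decide
  · have hc := core_eq i.natAbs (by omega) (by omega)
    by_cases hneg : i < 0
    · rw [if_pos hneg, if_neg h0, if_pos hneg, (by omega : (-i).toNat = i.natAbs), hc]
    · rw [if_neg hneg, if_neg h0, if_neg hneg, (by omega : i.toNat = i.natAbs), hc,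
          String.empty_append]
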